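-- pv_equiv track=rewrite | github.com/Srahin000/mentolo_ai | backend/app.py | _detect_learning_style
-- ===== SOURCE A (Python) =====
-- from typing import List, Dict
--
-- def _detect_learning_style(sessions: List[Dict]) -> str:
--     """Detect learning style from conversation patterns"""
--     visual_keywords = ['see', 'look', 'picture', 'color', 'watch']
--     kinesthetic_keywords = ['touch', 'feel', 'move', 'play', 'build', 'make']
--     auditory_keywords = ['hear', 'sound', 'listen', 'say', 'sing', 'music']
--
--     visual_count = 0
--     kinesthetic_count = 0
--     auditory_count = 0
--
--     for session in sessions:
--         transcript = session.get('transcript', '').lower()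
--         visual_count += sum(1 for kw in visual_keywords if kw in transcript)
--         kinesthetic_count += sum(1 for kw in kinesthetic_keywords if kw in transcript)
--         auditory_count += sum(1 for kw in auditory_keywords if kw in transcript)
--
--     if visual_count > kinesthetic_count and visual_count > auditory_count:
--         return 'visual'
--     elif kinesthetic_count > auditory_count:
--         return 'kinesthetic'
--     else:
--         return 'auditory'
-- ===== SOURCE B (Python) =====
-- def _detect_learning_style(sessions):
--     """Detect learning style from conversation patterns"""
--     # flat keyword -> (delta to visual-kinesthetic, delta to visual-auditory)
--     deltas = {
--         'see': (1, 1), 'look': (1, 1), 'picture': (1, 1), 'color': (1, 1), 'watch': (1, 1),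
--         'touch': (-1, 0), 'feel': (-1, 0), 'move': (-1, 0), 'play': (-1, 0),
--         'build': (-1, 0), 'make': (-1, 0),
--         'hear': (0, -1), 'sound': (0, -1), 'listen': (0, -1), 'say': (0, -1),
--         'sing': (0, -1), 'music': (0, -1),
--     }
--     d_vk = 0   # visual_count - kinesthetic_count
--     d_va = 0   # visual_count - auditory_count
--     for session in sessions:
--         t = session.get('transcript', '').lower()
--         for kw, (dk, da) in deltas.items():
--             if kw in t:
--                 d_vk += dk
--                 d_va += da
--     if d_vk > 0 and d_va > 0:
--         return 'visual'
--     if d_va > d_vk:   # kinesthetic_count > auditory_count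
--         return 'kinesthetic'
--     return 'auditory'
-- ===== Notes on version B (the rewrite author's own statement) =====
-- stated objective: alternative
-- what changed: Drops the three per-style counters entirely: a single flat keyword->delta table is scanned once per transcript, maintaining only two signed difference accumulators (visual-kinesthetic and visual-auditory), and the style is read off the signs of those differences instead of comparing counts.
import Mathlib
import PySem

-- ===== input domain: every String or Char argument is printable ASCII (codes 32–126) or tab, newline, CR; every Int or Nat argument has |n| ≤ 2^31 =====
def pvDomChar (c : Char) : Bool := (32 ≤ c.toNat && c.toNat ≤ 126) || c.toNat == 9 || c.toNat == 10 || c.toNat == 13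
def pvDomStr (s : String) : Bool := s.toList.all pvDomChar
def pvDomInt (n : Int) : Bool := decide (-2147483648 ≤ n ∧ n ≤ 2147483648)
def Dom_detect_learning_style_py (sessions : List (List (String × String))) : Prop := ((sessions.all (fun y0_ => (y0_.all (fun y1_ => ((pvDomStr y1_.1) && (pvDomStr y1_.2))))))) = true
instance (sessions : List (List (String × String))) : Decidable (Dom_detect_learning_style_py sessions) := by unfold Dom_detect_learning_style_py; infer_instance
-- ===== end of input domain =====

-- B replaces the three per-style counters by a flat keyword->delta table and two signed
-- difference accumulators (visual-kinesthetic, visual-auditory), reading the style off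
-- the signs; return values proved equal.

-- session.get('transcript', ''): first-match lookup in the association list
def pvGetTranscript (session : List (String × String)) : String :=
  ((session.find? (fun p => p.1 == "transcript")).map Prod.snd).getD ""

-- ===== PORT A =====
def pvVisualKw : List String := ["see", "look", "picture", "color", "watch"]
def pvKinKw : List String := ["touch", "feel", "move", "play", "build", "make"]
def pvAudKw : List String := ["hear", "sound", "listen", "say", "sing", "music"]

def detect_learning_style_py (sessions : List (List (String × String))) : String :=
  let r := sessions.foldl
    (fun (acc : Int × Int × Int) session =>
      let transcript := PySem.Str.lower (pvGetTranscript session)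
      (acc.1 + ((pvVisualKw.filter (fun kw => PySem.Str.isIn kw transcript)).map (fun _ => (1:Int))).sum,
       acc.2.1 + ((pvKinKw.filter (fun kw => PySem.Str.isIn kw transcript)).map (fun _ => (1:Int))).sum,
       acc.2.2 + ((pvAudKw.filter (fun kw => PySem.Str.isIn kw transcript)).map (fun _ => (1:Int))).sum))
    ((0:Int), (0:Int), (0:Int))
  if r.1 > r.2.1 ∧ r.1 > r.2.2 then "visual"
  else if r.2.1 > r.2.2 then "kinesthetic"
  else "auditory"

-- ===== PORT B =====
-- the literal keyword -> (Δ(visual-kinesthetic), Δ(visual-auditory)) table of Source B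
def pvDeltas : List (String × Int × Int) :=
  [("see", 1, 1), ("look", 1, 1), ("picture", 1, 1), ("color", 1, 1), ("watch", 1, 1),
   ("touch", -1, 0), ("feel", -1, 0), ("move", -1, 0), ("play", -1, 0),
   ("build", -1, 0), ("make", -1, 0),
   ("hear", 0, -1), ("sound", 0, -1), ("listen", 0, -1), ("say", 0, -1),
   ("sing", 0, -1), ("music", 0, -1)]

def detect_learning_style_py_alt (sessions : List (List (String × String))) : String :=
  let d := sessions.foldl
    (fun (d : Int × Int) session =>
      let t := PySem.Str.lower (pvGetTranscript session)
      pvDeltas.foldl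
        (fun (d : Int × Int) e =>
          if PySem.Str.isIn e.1 t then (d.1 + e.2.1, d.2 + e.2.2) else d)
        d)
    ((0:Int), (0:Int))
  if d.1 > 0 ∧ d.2 > 0 then "visual"
  else if d.2 > d.1 then "kinesthetic"
  else "auditory"

-- ===== PRECONDITION & SPEC =====
def Spec_detect_learning_style_py (sessions : List (List (String × String))) (out : String) : Prop := out = detect_learning_style_py_alt sessions
instance (sessions : List (List (String × String))) (out : String) : Decidable (Spec_detect_learning_style_py sessions out) := by unfold Spec_detect_learning_style_py; infer_instance

-- ===== CLAIM (what is proved, stated in full; the proofs are below) =====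
def Claim_equal_detect_learning_style_py : Prop := ∀ (sessions : List (List (String × String))), Dom_detect_learning_style_py sessions → Spec_detect_learning_style_py sessions (detect_learning_style_py sessions)

-- ===== LEMMAS AND PROOFS =====

-- keyword-hit count of a keyword list in a lowered transcript, as A computes it
def pvScore (kws : List String) (session : List (String × String)) : Int :=
  ((kws.filter (fun kw => PySem.Str.isIn kw (PySem.Str.lower (pvGetTranscript session)))).map (fun _ => (1:Int))).sum

-- folding a constant-delta segment of the table adds delta * (hit count)
theorem pv_fold_seg (t : String) (δ1 δ2 : Int) (kws : List String) (d : Int × Int) :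
    (kws.map (fun kw => (kw, δ1, δ2))).foldl
        (fun (d : Int × Int) e =>
          if PySem.Str.isIn e.1 t then (d.1 + e.2.1, d.2 + e.2.2) else d) d
      = (d.1 + δ1 * ((kws.filter (fun kw => PySem.Str.isIn kw t)).map (fun _ => (1:Int))).sum,
         d.2 + δ2 * ((kws.filter (fun kw => PySem.Str.isIn kw t)).map (fun _ => (1:Int))).sum) := by
  induction kws generalizing d with
  | nil => simp
  | cons x xs ih =>
      simp only [List.map_cons, List.foldl_cons]
      rw [ih]
      by_cases h : PySem.Str.isIn x t = true
      · rw [if_pos h]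
        simp only [List.filter_cons, if_pos h, List.map_cons, List.sum_cons, Prod.ext_iff]
        constructor <;> ring
      · rw [if_neg h]
        simp only [List.filter_cons, if_neg h]

-- the flat table is the concatenation of the three constant-delta segments
theorem pv_deltas_eq :
    pvDeltas = (pvVisualKw.map (fun kw => (kw, (1:Int), (1:Int))))
      ++ (pvKinKw.map (fun kw => (kw, (-1:Int), (0:Int))))
      ++ (pvAudKw.map (fun kw => (kw, (0:Int), (-1:Int)))) := rfl

-- one session's inner fold over the table adds the two count differences
theorem pv_inner (session : List (String × String)) (d : Int × Int) :
    (pvDeltas.foldl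
        (fun (d : Int × Int) e =>
          if PySem.Str.isIn e.1 (PySem.Str.lower (pvGetTranscript session)) then
            (d.1 + e.2.1, d.2 + e.2.2) else d) d)
      = (d.1 + (pvScore pvVisualKw session - pvScore pvKinKw session),
         d.2 + (pvScore pvVisualKw session - pvScore pvAudKw session)) := by
  rw [pv_deltas_eq, List.foldl_append, List.foldl_append,
      pv_fold_seg, pv_fold_seg, pv_fold_seg]
  simp [pvScore, Prod.ext_iff]
  constructor <;> ring

-- B's outer fold computes the total count differences
theorem pv_fold_b (sessions : List (List (String × String))) (d : Int × Int) :
    sessions.foldl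
      (fun (d : Int × Int) session =>
        let t := PySem.Str.lower (pvGetTranscript session)
        pvDeltas.foldl
          (fun (d : Int × Int) e =>
            if PySem.Str.isIn e.1 t then (d.1 + e.2.1, d.2 + e.2.2) else d) d) d
    = (d.1 + ((sessions.map (pvScore pvVisualKw)).sum - (sessions.map (pvScore pvKinKw)).sum),
       d.2 + ((sessions.map (pvScore pvVisualKw)).sum - (sessions.map (pvScore pvAudKw)).sum)) := by
  induction sessions generalizing d with
  | nil => simp
  | cons s t ih =>
      rw [List.foldl_cons]
      show List.foldl _ (pvDeltas.foldl _ d) t = _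
      rw [pv_inner, ih]
      simp only [List.map_cons, List.sum_cons, Prod.ext_iff]
      constructor <;> ring

-- A's fold computes the three totals
theorem pv_fold_a (sessions : List (List (String × String))) (a b c : Int) :
    sessions.foldl
      (fun (acc : Int × Int × Int) session =>
        let transcript := PySem.Str.lower (pvGetTranscript session)
        (acc.1 + ((pvVisualKw.filter (fun kw => PySem.Str.isIn kw transcript)).map (fun _ => (1:Int))).sum,
         acc.2.1 + ((pvKinKw.filter (fun kw => PySem.Str.isIn kw transcript)).map (fun _ => (1:Int))).sum,
         acc.2.2 + ((pvAudKw.filter (fun kw => PySem.Str.isIn kw transcript)).map (fun _ => (1:Int))).sum))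
      (a, b, c)
    = (a + (sessions.map (pvScore pvVisualKw)).sum,
       b + (sessions.map (pvScore pvKinKw)).sum,
       c + (sessions.map (pvScore pvAudKw)).sum) := by
  induction sessions generalizing a b c with
  | nil => simp
  | cons s t ih =>
      simp only [List.foldl_cons, List.map_cons, List.sum_cons, ih]
      simp only [pvScore, Prod.mk.injEq]
      refine ⟨by omega, by omega, by omega⟩

-- ===== VERDICT (by name: the statement is the Claim_ definition above) =====
theorem detect_learning_style_py_spec : Claim_equal_detect_learning_style_py := by
  intro sessions _
  unfold Spec_detect_learning_style_py detect_learning_style_py detect_learning_style_py_alt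
  rw [pv_fold_a, pv_fold_b]
  simp only [zero_add]
  split_ifs <;> first | rfl | omega
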